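-- pv_equiv track=rewrite | github.com/vicciv1623/MAD2502_final_project | main.py | sig_fig
-- ===== SOURCE A (Python) =====
-- def sig_fig(val: int) -> int:
-- 	val=str(val)
-- 	char=val[0]
--
-- 	digits=list(range(1,10))
-- 	digits=[str(x) for x in digits]
--
-- 	i=1
-- 	while char not in digits:
-- 		if i == len(val):
-- 			return 0
-- 		char=val[i]
-- 		i+=1
--
-- 	return int(char)
-- ===== SOURCE B (Python) =====
-- def sig_fig(val: int) -> int:
--     n = abs(val)
--     if n == 0:
--         return 0
--     while n >= 10:
--         n //= 10
--     return n
-- ===== Notes on version B (the rewrite author's own statement) =====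
-- stated objective: simpler
-- what changed: B extracts the leading digit by arithmetic (abs then repeated floor-division by 10) instead of scanning the characters of str(val) for the first nonzero digit.
import Mathlib
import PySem

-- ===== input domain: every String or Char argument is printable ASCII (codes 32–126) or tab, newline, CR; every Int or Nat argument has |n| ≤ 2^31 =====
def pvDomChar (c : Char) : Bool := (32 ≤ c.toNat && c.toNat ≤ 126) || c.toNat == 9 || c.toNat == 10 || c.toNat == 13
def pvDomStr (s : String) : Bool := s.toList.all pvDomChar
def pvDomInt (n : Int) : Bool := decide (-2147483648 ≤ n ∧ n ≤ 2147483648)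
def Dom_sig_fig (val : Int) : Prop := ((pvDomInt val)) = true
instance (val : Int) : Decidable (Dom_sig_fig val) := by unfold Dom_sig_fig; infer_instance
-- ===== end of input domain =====

-- B extracts the leading digit arithmetically (abs, then repeated floor-division by 10)
-- instead of A's scan of str(val)'s characters for the first nonzero digit; objective: simpler.


-- ===== PORT A =====
-- digits = [str(x) for x in range(1, 10)]
def sigFigDigits : List (List Char) :=
  (PySem.List.pyRange 1 10 1).map (fun x => PySem.Int.toChars x)

-- the while loop of A; `fuel` only makes the recursion structural (i strictly increases
-- towards len(s), so fuel = s.length is never exhausted)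
def sigFigLoop (s : List Char) (char : Char) (i : Nat) (fuel : Nat) : Int :=
  if [char] ∈ sigFigDigits then (PySem.Int.ofChars? [char]).getD 0
  else if (i : Int) = PySem.List.len s then 0
  else
    match fuel with
    | 0 => 0
    | f + 1 => sigFigLoop s (PySem.List.pyGetD s (i : Int) ' ') (i + 1) f

def sig_fig (val : Int) : Int :=
  let s := PySem.Int.toChars val           -- val = str(val)
  sigFigLoop s (PySem.List.pyGetD s 0 ' ') 1 s.length   -- char = val[0]; i = 1; while …

-- ===== PORT B =====
-- while n >= 10: n //= 10
def absLoop (n : Int) : Int :=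
  if 10 ≤ n then absLoop (PySem.Int.floordiv n 10) else n
termination_by n.toNat
decreasing_by
  rename_i h
  rw [PySem.Int.floordiv_eq_ediv_of_pos (by omega)]
  have h1 : n / 10 < n := by
    rw [Int.ediv_lt_iff_lt_mul (by omega)]; omega
  have h2 : 0 ≤ n / 10 := Int.ediv_nonneg (by omega) (by omega)
  omega

def sig_fig_alt (val : Int) : Int :=
  let n := |val|
  if n = 0 then 0 else absLoop n

-- ===== PRECONDITION & SPEC =====
def Spec_sig_fig (val : Int) (out : Int) : Prop := out = sig_fig_alt val
instance (val : Int) (out : Int) : Decidable (Spec_sig_fig val out) := by unfold Spec_sig_fig; infer_instance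

-- ===== CLAIM (what is proved, stated in full; the proofs are below) =====
def Claim_equal_sig_fig : Prop := ∀ (val : Int), Dom_sig_fig val → Spec_sig_fig val (sig_fig val)

-- ===== LEMMAS AND PROOFS =====

-- most significant decimal digit of a positive Nat (proof-side characterisation of both loops)
def msd (m : Nat) : Nat :=
  if h : 10 ≤ m then msd (m / 10) else m
termination_by m
decreasing_by exact Nat.div_lt_self (by omega) (by omega)

theorem msd_bounds (m : Nat) (hm : 0 < m) : 1 ≤ msd m ∧ msd m ≤ 9 := by
  induction m using msd.induct with
  | case1 m h ih =>
    rw [msd, dif_pos h]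
    exact ih (Nat.div_pos h (by omega))
  | case2 m h => rw [msd, dif_neg h]; omega

theorem absLoop_natCast (m : Nat) : absLoop (m : Int) = (msd m : Int) := by
  induction m using msd.induct with
  | case1 m h ih =>
    rw [absLoop, if_pos (by exact_mod_cast h), msd, dif_pos h]
    rw [show PySem.Int.floordiv (m : Int) 10 = ((m / 10 : Nat) : Int) from
      PySem.Int.floordiv_natCast m 10]
    exact ih
  | case2 m h =>
    rw [absLoop, if_neg (by omega), msd, dif_neg h]

theorem toDigits_head (m : Nat) (hm : 0 < m) :
    ∃ t, Nat.toDigits 10 m = Nat.digitChar (msd m) :: t := by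
  induction m using msd.induct with
  | case1 m h ih =>
    obtain ⟨t, ht⟩ := ih (Nat.div_pos h (by omega))
    have hmsd : msd m = msd (m / 10) := by
      conv_lhs => rw [msd]
      rw [dif_pos h]
    rw [Nat.toDigits_of_base_le (by omega) h, ht, hmsd]
    exact ⟨t ++ [Nat.digitChar (m % 10)], rfl⟩
  | case2 m h =>
    rw [Nat.toDigits_of_lt_base (by omega), msd, dif_neg h]
    exact ⟨[], rfl⟩

-- for a digit d in 1..9, scanning it succeeds immediately and returns d
theorem digit_mem (d : Nat) (h1 : 1 ≤ d) (h9 : d ≤ 9) :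
    [Nat.digitChar d] ∈ sigFigDigits ∧
      (PySem.Int.ofChars? [Nat.digitChar d]).getD 0 = (d : Int) := by
  interval_cases d <;> exact ⟨by decide, by decide⟩

theorem dash_not_mem : ['-'] ∉ sigFigDigits := by decide

theorem sigFigLoop_mem (s : List Char) (char : Char) (i fuel : Nat)
    (h : [char] ∈ sigFigDigits) :
    sigFigLoop s char i fuel = (PySem.Int.ofChars? [char]).getD 0 := by
  rw [sigFigLoop.eq_def, if_pos h]

theorem sigFigLoop_step (s : List Char) (char : Char) (i fuel : Nat)
    (h1 : [char] ∉ sigFigDigits) (h2 : (i : Int) ≠ PySem.List.len s) :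
    sigFigLoop s char i (fuel + 1)
      = sigFigLoop s (PySem.List.pyGetD s (i : Int) ' ') (i + 1) fuel := by
  rw [sigFigLoop.eq_def, if_neg h1, if_neg h2]

theorem sig_fig_pos (m : Nat) (hm : 0 < m) : sig_fig (m : Int) = (msd m : Int) := by
  obtain ⟨t, ht⟩ := toDigits_head m hm
  obtain ⟨hmem, hval⟩ := digit_mem (msd m) (msd_bounds m hm).1 (msd_bounds m hm).2
  have hchars : PySem.Int.toChars (m : Int) = Nat.toDigits 10 m := by
    simp [PySem.Int.toChars]
  unfold sig_fig
  simp only [hchars, ht, PySem.List.pyGetD_zero_cons]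
  rw [sigFigLoop_mem _ _ _ _ hmem, hval]

theorem sig_fig_spec_aux (val : Int) : sig_fig val = sig_fig_alt val := by
  rcases lt_trichotomy val 0 with hneg | hz | hpos
  · -- negative: str(val) = '-' :: digits of natAbs
    set m := val.natAbs with hm
    have hm0 : 0 < m := by omega
    obtain ⟨t, ht⟩ := toDigits_head m hm0
    obtain ⟨hmem, hval'⟩ := digit_mem (msd m) (msd_bounds m hm0).1 (msd_bounds m hm0).2
    have hchars : PySem.Int.toChars val = '-' :: Nat.toDigits 10 m := by
      simp [PySem.Int.toChars, hneg]
      rw [hm]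
    unfold sig_fig
    simp only [hchars, ht, PySem.List.pyGetD_zero_cons, List.length_cons]
    rw [sigFigLoop_step _ _ _ _ dash_not_mem
      (by simp [PySem.List.len_eq]; omega)]
    have hget : PySem.List.pyGetD ('-' :: Nat.digitChar (msd m) :: t) ((1:Nat) : Int) ' '
        = Nat.digitChar (msd m) := by
      simp [PySem.List.pyGetD, PySem.List.pyGet?, PySem.List.pyIdx?]
    rw [hget]
    rw [sigFigLoop_mem _ _ _ _ hmem, hval']
    unfold sig_fig_alt
    have habs : |val| = (m : Int) := by rw [abs_of_neg hneg]; omega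
    rw [habs, if_neg (by omega), absLoop_natCast]
  · subst hz; decide
  · have : val = (val.toNat : Int) := by omega
    rw [this, sig_fig_pos val.toNat (by omega)]
    unfold sig_fig_alt
    rw [if_neg (by simp; omega)]
    have : |(val.toNat : Int)| = (val.toNat : Int) := by simp
    rw [this, absLoop_natCast]

-- ===== VERDICT (by name: the statement is the Claim_ definition above) =====
theorem sig_fig_spec : Claim_equal_sig_fig := by
  intro val _
  unfold Spec_sig_fig
  exact sig_fig_spec_aux val
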